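-- pv_equiv track=rewrite | github.com/Sedlacek2030/pg | zkouska1.py | process_strings
-- ===== SOURCE A (Python) =====
-- def process_strings(strings):
--     výsledek = []
--     for string in strings:  #pro každý string zkontroluje jestli není "STOP", jinak kontroluje délku stringu (pokud projde vrátí UPPERCASE verzi)
--         if string == "STOP":
--             break           #přerušení for loopu
--         if len(string) >3:
--             výsledek.append(string.upper()) #append != add (add nepřidává na konec a nedovoluje duplikáty) seznam/set
--     return výsledek
-- ===== SOURCE B (Python) =====
-- def process_strings(strings):
--     # locate the first "STOP" up front; everything after it is irrelevant
--     cut = strings.index("STOP") if "STOP" in strings else len(strings)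
--     out = []
--     # build the result back-to-front from the truncated list, then reverse once
--     for s in reversed(strings[:cut]):
--         if len(s) > 3:
--             out.append(s.upper())
--     out.reverse()
--     return out
-- ===== Notes on version B (the rewrite author's own statement) =====
-- stated objective: alternative
-- what changed: Instead of a fused forward loop with break, B first locates the first "STOP" by index search, truncates the list there, then walks the truncated list BACKWARDS building the output back-to-front and reverses it once at the end.
import Mathlib
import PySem

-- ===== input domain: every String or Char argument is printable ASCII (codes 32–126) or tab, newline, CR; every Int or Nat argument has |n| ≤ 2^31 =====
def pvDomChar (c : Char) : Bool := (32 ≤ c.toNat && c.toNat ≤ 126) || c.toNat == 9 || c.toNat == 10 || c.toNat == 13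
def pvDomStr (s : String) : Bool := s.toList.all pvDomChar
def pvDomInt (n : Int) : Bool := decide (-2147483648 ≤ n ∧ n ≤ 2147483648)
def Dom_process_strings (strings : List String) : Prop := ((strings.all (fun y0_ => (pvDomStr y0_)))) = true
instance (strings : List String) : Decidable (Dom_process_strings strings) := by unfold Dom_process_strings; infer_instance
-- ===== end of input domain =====

-- B locates the first "STOP" by an index search, truncates there, then builds the output
-- back-to-front over the reversed truncated list and reverses once; alternative decomposition,
-- same O(n) cost. Return values only; no mutation.

-- ===== PORT A =====
-- fused loop: break on "STOP", append upper-case when len > 3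
def process_strings_go (acc : List String) : List String → List String
  | [] => acc
  | s :: rest =>
    if s = "STOP" then acc
    else if 3 < PySem.Str.len s then process_strings_go (acc ++ [PySem.Str.upper s]) rest
    else process_strings_go acc rest

def process_strings (strings : List String) : List String :=
  process_strings_go [] strings

-- ===== PORT B =====
-- cut = strings.index("STOP") if present else len(strings)
def process_strings_alt_cut (strings : List String) : Nat :=
  match PySem.List.index? strings "STOP" with
  | some i => i
  | none => strings.length

-- backwards loop appending, then a final reverse
def process_strings_alt (strings : List String) : List String :=
  let cut := process_strings_alt_cut strings
  let out := (PySem.List.slice strings none (some (cut : Int))).reverse.foldl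
      (fun acc s => if 3 < PySem.Str.len s then acc ++ [PySem.Str.upper s] else acc) []
  out.reverse

-- ===== PRECONDITION & SPEC =====
def Spec_process_strings (strings : List String) (out : List String) : Prop := out = process_strings_alt strings
instance (strings : List String) (out : List String) : Decidable (Spec_process_strings strings out) := by unfold Spec_process_strings; infer_instance

-- ===== CLAIM (what is proved, stated in full; the proofs are below) =====
def Claim_equal_process_strings : Prop := ∀ (strings : List String), Dom_process_strings strings → Spec_process_strings strings (process_strings strings)

-- ===== LEMMAS AND PROOFS =====
-- canonical form both ports reduce to
def process_strings_canon (l : List String) : List String :=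
  ((l.takeWhile (fun s => s != "STOP")).filter
      (fun s => decide (3 < PySem.Str.len s))).map PySem.Str.upper

theorem process_strings_go_eq (l : List String) : ∀ acc : List String,
    process_strings_go acc l = acc ++ process_strings_canon l := by
  induction l with
  | nil => intro acc; simp [process_strings_go, process_strings_canon]
  | cons s rest ih =>
    intro acc
    by_cases h : s = "STOP"
    · simp [process_strings_go, process_strings_canon, h]
    · have hb : (s != "STOP") = true := by simp [h]
      by_cases hl : 3 < PySem.Str.len s
      · rw [show process_strings_go acc (s :: rest)
              = process_strings_go (acc ++ [PySem.Str.upper s]) rest from by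
            simp only [process_strings_go]; rw [if_neg h, if_pos hl], ih]
        simp only [process_strings_canon, List.takeWhile_cons, hb, if_true,
          List.filter_cons, decide_eq_true hl, List.map_cons, List.append_assoc,
          List.singleton_append]
      · rw [show process_strings_go acc (s :: rest) = process_strings_go acc rest from by
            simp only [process_strings_go]; rw [if_neg h, if_neg hl], ih]
        simp only [process_strings_canon, List.takeWhile_cons, hb, if_true,
          List.filter_cons, decide_eq_false hl, Bool.false_eq_true, if_false]

-- truncation at the first "STOP" equals takeWhile (≠ "STOP")
theorem take_cut_eq_takeWhile (l : List String) :
    l.take (process_strings_alt_cut l) = l.takeWhile (fun s => s != "STOP") := by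
  induction l with
  | nil => simp [process_strings_alt_cut]
  | cons s rest ih =>
    by_cases h : s = "STOP"
    · subst h
      unfold process_strings_alt_cut
      rw [PySem.List.index?_cons_self]
      simp
    · have hidx : PySem.List.index? (s :: rest) "STOP"
          = (PySem.List.index? rest "STOP").map (· + 1) :=
        PySem.List.index?_cons_of_ne rest h
      have hb : (s != "STOP") = true := by simp [h]
      cases hr : PySem.List.index? rest "STOP" with
      | none =>
        simp only [process_strings_alt_cut, hidx, hr, Option.map_none, List.length_cons,
          List.takeWhile_cons, hb, if_true, List.take_succ_cons]
        rw [← ih]; unfold process_strings_alt_cut; rw [hr]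
      | some i =>
        simp only [process_strings_alt_cut, hidx, hr, Option.map_some,
          List.takeWhile_cons, hb, if_true, List.take_succ_cons]
        rw [← ih]; unfold process_strings_alt_cut; rw [hr]

-- the backwards append-fold computes filter+map of the traversed list
theorem foldl_filter_map (l : List String) : ∀ acc : List String,
    l.foldl (fun acc s => if 3 < PySem.Str.len s then acc ++ [PySem.Str.upper s] else acc) acc
      = acc ++ (l.filter (fun s => decide (3 < PySem.Str.len s))).map PySem.Str.upper := by
  induction l with
  | nil => intro acc; simp
  | cons s rest ih =>
    intro acc
    by_cases hl : 3 < PySem.Str.len s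
    · rw [List.foldl_cons, if_pos hl, ih, List.filter_cons, if_pos (by exact decide_eq_true hl)]
      simp
    · rw [List.foldl_cons, if_neg hl, ih, List.filter_cons, if_neg (by simpa using hl)]

theorem alt_eq_canon (l : List String) :
    process_strings_alt l = process_strings_canon l := by
  show ((PySem.List.slice l none (some ((process_strings_alt_cut l : Nat) : Int))).reverse.foldl
      (fun acc s => if 3 < PySem.Str.len s then acc ++ [PySem.Str.upper s] else acc) []).reverse
      = process_strings_canon l
  rw [PySem.List.slice_to_natCast, foldl_filter_map, take_cut_eq_takeWhile]
  simp [process_strings_canon, List.filter_reverse, List.map_reverse]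

-- ===== VERDICT (by name: the statement is the Claim_ definition above) =====
theorem process_strings_spec : Claim_equal_process_strings := by
  intro strings _
  unfold Spec_process_strings process_strings
  rw [alt_eq_canon]
  simpa using process_strings_go_eq strings []
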